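-- pv_equiv track=rewrite | github.com/durgeshsingh90/Monkey | hex2iso/json2hex.py | build_bitmap
-- ===== SOURCE A (Python) =====
-- def build_bitmap(fields_present):
--     bits = ['0'] * 128
--     for field in fields_present:
--         if field.startswith("DE"):
--             index = int(field[2:]) - 1
--             if 0 <= index < 128:
--                 bits[index] = '1'
--
--     primary = bits[:64]
--     secondary = bits[64:]
--
--     if '1' in secondary:
--         primary[0] = '1'
--         full_bitmap = ''.join(primary + secondary)
--         bitmap_hex = hex(int(full_bitmap, 2))[2:].zfill(32).upper()
--     else:
--         full_bitmap = ''.join(primary)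
--         bitmap_hex = hex(int(full_bitmap, 2))[2:].zfill(16).upper()
--
--     return bitmap_hex.encode().hex()
-- ===== SOURCE B (Python) =====
-- def build_bitmap(fields_present):
--     idxs = set()
--     for field in fields_present:
--         if field.startswith("DE"):
--             i = int(field[2:]) - 1
--             if 0 <= i < 128:
--                 idxs.add(i)
--     if any(i >= 64 for i in idxs):
--         idxs.add(0)
--         nibbles = 32
--     else:
--         nibbles = 16
--     digits = "0123456789ABCDEF"
--     hex_str = ''.join(
--         digits[sum(8 >> k for k in range(4) if 4 * j + k in idxs)]
--         for j in range(nibbles)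
--     )
--     return hex_str.encode().hex()
-- ===== Notes on version B (the rewrite author's own statement) =====
-- stated objective: alternative
-- what changed: B never materializes a bitmap at all: it collects the set of present field indices and emits each output hex digit directly from membership of its four bit positions, instead of A's 128-char '0'/'1' array that is sliced, joined, re-parsed with int(s,2) and formatted with hex()/zfill()/upper().
import Mathlib
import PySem

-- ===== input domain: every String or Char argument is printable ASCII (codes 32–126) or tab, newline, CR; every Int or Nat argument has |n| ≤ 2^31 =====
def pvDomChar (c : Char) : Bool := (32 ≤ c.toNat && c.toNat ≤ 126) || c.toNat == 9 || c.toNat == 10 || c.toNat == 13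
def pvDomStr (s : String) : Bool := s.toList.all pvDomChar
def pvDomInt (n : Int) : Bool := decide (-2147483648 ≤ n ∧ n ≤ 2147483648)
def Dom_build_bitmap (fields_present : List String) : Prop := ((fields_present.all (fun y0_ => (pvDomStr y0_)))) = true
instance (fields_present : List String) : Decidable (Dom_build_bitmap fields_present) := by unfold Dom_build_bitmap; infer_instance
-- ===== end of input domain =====

-- B collects the set of present field indices and emits each output hex digit directly from
-- membership of its four bit positions, instead of A's 128-char array that is joined, re-parsed
-- with int(s,2) and re-formatted with hex()/zfill()/upper() (objective: alternative).

-- ===== shared helper (port of s.encode().hex(), called by both versions) =====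
-- lowercase hex digit of d (exact for d < 16)
def pvHexDigit (d : Nat) : Char := if d < 10 then Char.ofNat (48 + d) else Char.ofNat (87 + d)

-- s.encode().hex() for an ASCII string: two lowercase hex digits per character (exact on the ASCII domain)
def pvEncodeHex (cs : List Char) : String :=
  String.ofList (cs.flatMap (fun c => [pvHexDigit (c.toNat / 16), pvHexDigit (c.toNat % 16)]))

-- ===== PORT A =====
-- hex(n)[2:] for 0 ≤ n: lowercase hex digits, no prefix (exact for nonnegative n, the only case A reaches)
def pvHexLower (n : Nat) : List Char :=
  if _h : n < 16 then [pvHexDigit n]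
  else pvHexLower (n / 16) ++ [pvHexDigit (n % 16)]
  decreasing_by exact Nat.div_lt_self (by omega) (by omega)

-- int(s, 2): hand port, exact here because A only applies it to nonempty strings of '0'/'1'
-- (no sign, whitespace, underscore or 0b prefix ever occurs in full_bitmap)
def pvBinVal (cs : List Char) : Nat :=
  cs.foldl (fun a c => 2 * a + (if c = '1' then 1 else 0)) 0

-- loop body of A: one field processed against the char list
def pvSetBit (bits : List Char) (field : String) : List Char :=
  if PySem.Str.startswith field "DE" then
    match PySem.Int.ofChars? (PySem.List.slice field.toList (some 2) none) with
    | some v =>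
      let index := v - 1
      if 0 ≤ index ∧ index < 128 then bits.set index.toNat '1' else bits
    | none => bits   -- int(field[2:]) raises ValueError here; excluded by Pre_
  else bits

def build_bitmap (fields_present : List String) : String :=
  let bits := fields_present.foldl pvSetBit (List.replicate 128 '0')
  let primary := PySem.List.slice bits none (some 64)
  let secondary := PySem.List.slice bits (some 64) none
  if secondary.contains '1' then
    let primary := primary.set 0 '1'
    let full_bitmap := primary ++ secondary
    let bitmap_hex := PySem.Chars.upper (PySem.Chars.zfill (pvHexLower (pvBinVal full_bitmap)) 32)
    pvEncodeHex bitmap_hex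
  else
    let full_bitmap := primary
    let bitmap_hex := PySem.Chars.upper (PySem.Chars.zfill (pvHexLower (pvBinVal full_bitmap)) 16)
    pvEncodeHex bitmap_hex

-- ===== PORT B =====
-- loop body of B: one field's index added to the set of present indices
def pvAddIdx (idxs : PySem.Set Int) (field : String) : PySem.Set Int :=
  if PySem.Str.startswith field "DE" then
    match PySem.Int.ofChars? (PySem.List.slice field.toList (some 2) none) with
    | some v =>
      let i := v - 1
      if 0 ≤ i ∧ i < 128 then PySem.Set.add idxs i else idxs
    | none => idxs   -- int(field[2:]) raises ValueError here; excluded by Pre_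
  else idxs

-- "0123456789ABCDEF"
def pvDigits : List Char := ['0','1','2','3','4','5','6','7','8','9','A','B','C','D','E','F']

-- digits[sum(8 >> k for k in range(4) if 4*j + k in idxs)]
def pvNibble (idxs : PySem.Set Int) (j : Nat) : Char :=
  pvDigits.getD ((((List.range 4).filter
      (fun k => PySem.Set.contains idxs ((4 * j + k : Nat) : Int))).map (fun k => 8 >>> k)).sum) '0'

def build_bitmap_alt (fields_present : List String) : String :=
  let idxs := fields_present.foldl pvAddIdx PySem.Set.empty
  -- 'any(i >= 64 for i in idxs)': order-independent consumption of the set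
  if idxs.any (fun i => decide (64 ≤ i)) then
    pvEncodeHex ((List.range 32).map (pvNibble (PySem.Set.add idxs 0)))
  else
    pvEncodeHex ((List.range 16).map (pvNibble idxs))

-- ===== PRECONDITION & SPEC =====
-- Pre_ excludes exactly the inputs on which A raises ValueError: a field that starts with
-- "DE" but whose remainder int() cannot parse ("DE", "DEX", "DE1.5", ...).
def Pre_build_bitmap (fields_present : List String) : Prop :=
  ∀ field ∈ fields_present, PySem.Str.startswith field "DE" = true →
    (PySem.Int.ofChars? (PySem.List.slice field.toList (some 2) none)).isSome = true
instance (fields_present : List String) : Decidable (Pre_build_bitmap fields_present) := by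
  unfold Pre_build_bitmap; infer_instance

def pvWitness_build_bitmap : List String := ["DE2", "DE65", "xyz"]

def Spec_build_bitmap (fields_present : List String) (out : String) : Prop := out = build_bitmap_alt fields_present
instance (fields_present : List String) (out : String) : Decidable (Spec_build_bitmap fields_present out) := by unfold Spec_build_bitmap; infer_instance

-- ===== CLAIM (what is proved, stated in full; the proofs are below) =====
def Claim_equal_build_bitmap : Prop := ∀ (fields_present : List String), Dom_build_bitmap fields_present → Pre_build_bitmap fields_present → Spec_build_bitmap fields_present (build_bitmap fields_present)

-- ===== LEMMAS AND PROOFS =====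

-- uppercase hex digit of d (proof-side)
def pvHexDigitU (d : Nat) : Char := if d < 10 then Char.ofNat (48 + d) else Char.ofNat (55 + d)

-- uppercase hex digits of n (proof-side)
def pvHexUpper (n : Nat) : List Char :=
  if _h : n < 16 then [pvHexDigitU n]
  else pvHexUpper (n / 16) ++ [pvHexDigitU (n % 16)]
  decreasing_by exact Nat.div_lt_self (by omega) (by omega)

-- proof-side integer bitmap mirroring A's char list and B's index set
def pvOrBit (bm : Nat) (field : String) : Nat :=
  if PySem.Str.startswith field "DE" then
    match PySem.Int.ofChars? (PySem.List.slice field.toList (some 2) none) with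
    | some v =>
      let i := v - 1
      if 0 ≤ i ∧ i < 128 then bm ||| (1 <<< (127 - i.toNat)) else bm
    | none => bm
  else bm

-- the char list A maintains, as a function of the proof-side integer bitmap
def pvBitsOf (bm : Nat) : List Char :=
  (List.range 128).map (fun i => if bm.testBit (127 - i) then '1' else '0')

theorem pvBitsOf_zero : pvBitsOf 0 = List.replicate 128 '0' := by decide

theorem pvBitsOf_set (bm : Nat) (k : Nat) (hk : k < 128) :
    (pvBitsOf bm).set k '1' = pvBitsOf (bm ||| (1 <<< (127 - k))) := by
  have hlen : ((pvBitsOf bm).set k '1').length = (pvBitsOf (bm ||| (1 <<< (127 - k)))).length := by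
    simp [pvBitsOf]
  apply List.ext_getElem hlen
  intro j h1 h2
  have hj : j < 128 := by
    simpa [pvBitsOf] using h2
  simp only [pvBitsOf, List.getElem_set, List.getElem_map, List.getElem_range,
    Nat.one_shiftLeft, Nat.testBit_or, Nat.testBit_two_pow]
  by_cases hkj : k = j
  · subst hkj; simp
  · have : ¬ (127 - k = 127 - j) := by omega
    simp [hkj, this]

theorem pvStep_eq (bm : Nat) (f : String) : pvSetBit (pvBitsOf bm) f = pvBitsOf (pvOrBit bm f) := by
  unfold pvSetBit pvOrBit
  split
  · cases PySem.Int.ofChars? (PySem.List.slice f.toList (some 2) none) with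
    | none => rfl
    | some v =>
      simp only []
      split
      · next hv =>
        exact pvBitsOf_set bm (v - 1).toNat (by omega)
      · rfl
  · rfl

theorem pvLoop_eq (fields : List String) (bm : Nat) :
    fields.foldl pvSetBit (pvBitsOf bm) = pvBitsOf (fields.foldl pvOrBit bm) := by
  induction fields generalizing bm with
  | nil => rfl
  | cons f rest ih => simp only [List.foldl_cons, pvStep_eq, ih]

theorem pvOrBit_lt (bm : Nat) (f : String) (h : bm < 2 ^ 128) : pvOrBit bm f < 2 ^ 128 := by
  unfold pvOrBit
  split
  · cases PySem.Int.ofChars? (PySem.List.slice f.toList (some 2) none) with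
    | none => exact h
    | some v =>
      simp only []
      split
      · exact Nat.or_lt_two_pow h (by
          rw [Nat.one_shiftLeft]
          exact pow_lt_pow_right₀ (by omega) (by omega))
      · exact h
  · exact h

theorem pvLoop_lt (fields : List String) (bm : Nat) (h : bm < 2 ^ 128) :
    fields.foldl pvOrBit bm < 2 ^ 128 := by
  induction fields generalizing bm with
  | nil => exact h
  | cons f rest ih => exact ih _ (pvOrBit_lt bm f h)

-- == relating B's index set to the proof-side integer ==

def pvInv (S : PySem.Set Int) (bm : Nat) : Prop :=
  ∀ i : Int, i ∈ S ↔ (0 ≤ i ∧ i < 128 ∧ bm.testBit (127 - i.toNat) = true)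

theorem pvInv_zero : pvInv PySem.Set.empty 0 := by
  intro i
  simp [PySem.Set.empty, Nat.zero_testBit]

theorem pvInv_add (S : PySem.Set Int) (bm : Nat) (h : pvInv S bm)
    (i0 : Int) (h0 : 0 ≤ i0) (h1 : i0 < 128) :
    pvInv (PySem.Set.add S i0) (bm ||| (1 <<< (127 - i0.toNat))) := by
  intro i
  rw [PySem.Set.mem_add, h i]
  simp only [Nat.one_shiftLeft, Nat.testBit_or, Nat.testBit_two_pow, Bool.or_eq_true,
    decide_eq_true_eq]
  constructor
  · rintro (⟨ha, hb, hc⟩ | rfl)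
    · exact ⟨ha, hb, Or.inl hc⟩
    · exact ⟨h0, h1, Or.inr rfl⟩
  · rintro ⟨ha, hb, hc | hc⟩
    · exact Or.inl ⟨ha, hb, hc⟩
    · right; omega

theorem pvAddStep (S : PySem.Set Int) (bm : Nat) (f : String) (h : pvInv S bm) :
    pvInv (pvAddIdx S f) (pvOrBit bm f) := by
  unfold pvAddIdx pvOrBit
  split
  · cases PySem.Int.ofChars? (PySem.List.slice f.toList (some 2) none) with
    | none => exact h
    | some v =>
      simp only []
      split
      · next hv => exact pvInv_add S bm h (v - 1) hv.1 hv.2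
      · exact h
  · exact h

theorem pvLoop_inv (fields : List String) (S : PySem.Set Int) (bm : Nat) (h : pvInv S bm) :
    pvInv (fields.foldl pvAddIdx S) (fields.foldl pvOrBit bm) := by
  induction fields generalizing S bm with
  | nil => exact h
  | cons f rest ih => exact ih _ _ (pvAddStep S bm f h)

theorem pvAny_iff (S : PySem.Set Int) (bm : Nat) (h : pvInv S bm) :
    (S.any (fun i => decide (64 ≤ i)) = true) ↔ bm &&& ((1 <<< 64) - 1) ≠ 0 := by
  rw [Nat.one_shiftLeft, Nat.and_two_pow_sub_one_eq_mod, List.any_eq_true]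
  constructor
  · rintro ⟨i, hiS, hi64⟩ hz
    rw [decide_eq_true_eq] at hi64
    obtain ⟨ha, hb, hc⟩ := (h i).mp hiS
    have hpos : 127 - i.toNat < 64 := by omega
    have : (bm % 2 ^ 64).testBit (127 - i.toNat) = true := by
      rw [Nat.testBit_mod_two_pow]
      simp [hc, hpos]
    rw [hz] at this
    simp [Nat.zero_testBit] at this
  · intro hz
    by_contra hne
    simp only [not_exists, not_and] at hne
    apply hz
    apply Nat.eq_of_testBit_eq
    intro k
    rw [Nat.testBit_mod_two_pow, Nat.zero_testBit]
    by_cases hk : k < 64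
    · have hbk : bm.testBit k = false := by
        by_contra hb
        rw [Bool.not_eq_false] at hb
        have hmem : ((127 - k : Nat) : Int) ∈ S := by
          rw [h]
          refine ⟨by omega, by omega, ?_⟩
          rw [show ((127 - k : Nat) : Int).toNat = 127 - k by omega,
            show 127 - (127 - k) = k by omega]
          exact hb
        have := hne _ hmem
        simp only [decide_eq_true_eq] at this
        omega
      simp [hbk]
    · simp [hk]

-- == uppercase hex formatting ==

theorem pvDigit_upper (d : Nat) (hd : d < 16) :
    PySem.Chars.upperChar (pvHexDigit d) = pvHexDigitU d := by
  interval_cases d <;> decide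

theorem pvHexUpper_eq (n : Nat) : pvHexUpper n = PySem.Chars.upper (pvHexLower n) := by
  fun_induction pvHexLower n with
  | case1 n h =>
    rw [pvHexUpper, dif_pos h]
    simp [PySem.Chars.upper, pvDigit_upper n h]
  | case2 n h ih =>
    rw [pvHexUpper, dif_neg h]
    simp only [PySem.Chars.upper, List.map_append, List.map_cons, List.map_nil]
    rw [pvDigit_upper _ (Nat.mod_lt _ (by omega))]
    rw [← PySem.Chars.upper, ← ih]

theorem pvHexDigit_mem (d : Nat) (hd : d < 16) :
    pvHexDigit d ∈ ['0','1','2','3','4','5','6','7','8','9','a','b','c','d','e','f'] := by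
  interval_cases d <;> decide

theorem pvHexLower_head (n : Nat) : ∃ c rest, pvHexLower n = c :: rest ∧
    c ∈ ['0','1','2','3','4','5','6','7','8','9','a','b','c','d','e','f'] := by
  fun_induction pvHexLower n with
  | case1 n h => exact ⟨pvHexDigit n, [], rfl, pvHexDigit_mem n h⟩
  | case2 n h ih =>
    rcases ih with ⟨c, rest, he, hc⟩
    exact ⟨c, rest ++ [pvHexDigit (n % 16)], by rw [he]; rfl, hc⟩

theorem pvHexDigitU_mem (d : Nat) (hd : d < 16) :
    pvHexDigitU d ∈ ['0','1','2','3','4','5','6','7','8','9','A','B','C','D','E','F'] := by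
  interval_cases d <;> decide

theorem pvHexUpper_head (n : Nat) : ∃ c rest, pvHexUpper n = c :: rest ∧
    c ∈ ['0','1','2','3','4','5','6','7','8','9','A','B','C','D','E','F'] := by
  fun_induction pvHexUpper n with
  | case1 n h => exact ⟨pvHexDigitU n, [], rfl, pvHexDigitU_mem n h⟩
  | case2 n h ih =>
    rcases ih with ⟨c, rest, he, hc⟩
    exact ⟨c, rest ++ [pvHexDigitU (n % 16)], by rw [he]; rfl, hc⟩

theorem pvUpper_zfill (n : Nat) (w : Int) :
    PySem.Chars.upper (PySem.Chars.zfill (pvHexLower n) w) = PySem.Chars.zfill (pvHexUpper n) w := by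
  rcases pvHexLower_head n with ⟨c, rest, he, hc⟩
  have hup : pvHexUpper n = PySem.Chars.upperChar c :: rest.map PySem.Chars.upperChar := by
    rw [pvHexUpper_eq, he]; rfl
  have hnc : ¬ (c = '+' ∨ c = '-') := by
    fin_cases hc <;> decide
  have hnc' : ¬ (PySem.Chars.upperChar c = '+' ∨ PySem.Chars.upperChar c = '-') := by
    fin_cases hc <;> decide
  rw [he, hup, PySem.Chars.zfill.eq_def, PySem.Chars.zfill.eq_def]
  simp only [List.length_cons, List.length_map]
  split
  · simp [PySem.Chars.upper]
  · simp only [PySem.Chars.upper, List.map_append, List.map_replicate, List.map_cons]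
    rw [show PySem.Chars.upperChar '0' = '0' by decide]

-- zfill distributes over appending a trailing digit (head not a sign)
theorem pvZfill_snoc (a : List Char) (x c : Char) (rest : List Char) (ha : a = c :: rest)
    (hc : ¬ (c = '+' ∨ c = '-')) (w : Nat) :
    PySem.Chars.zfill (a ++ [x]) ((w : Int) + 1) = PySem.Chars.zfill a (w : Int) ++ [x] := by
  subst ha
  rw [PySem.Chars.zfill.eq_def, PySem.Chars.zfill.eq_def]
  by_cases hw : (w : Int) ≤ ((c :: rest).length : Nat)
  · rw [if_pos hw, if_pos (by simp only [List.cons_append, List.length_cons, List.length_append,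
      List.length_cons, List.length_nil] at hw ⊢; omega)]
  · rw [if_neg hw, if_neg (by simp only [List.cons_append, List.length_cons, List.length_append,
      List.length_cons, List.length_nil] at hw ⊢; omega)]
    simp only [List.cons_append]
    rw [if_neg hc, if_neg hc]
    simp only [List.length_cons, List.length_append, List.length_nil]
    rw [show ((w : Int) + 1).toNat - (rest.length + 1 + 1) = (w : Int).toNat - (rest.length + 1) by omega]
    simp

-- format(n, '0wX') written one nibble at a time
theorem pvFormat (w : Nat) (n : Nat) (h1 : 1 ≤ w) (h2 : n < 16 ^ w) :
    PySem.Chars.zfill (pvHexUpper n) ((w : Nat) : Int)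
      = (List.range w).map (fun j => pvHexDigitU (n / 16 ^ (w - 1 - j) % 16)) := by
  induction w generalizing n with
  | zero => omega
  | succ w ih =>
    by_cases hw : w = 0
    · subst hw
      have hn : n < 16 := by simpa using h2
      rw [pvHexUpper, dif_pos hn, PySem.Chars.zfill.eq_def]
      rw [if_pos (by simp)]
      simp [Nat.mod_eq_of_lt hn]
    · have hw1 : 1 ≤ w := by omega
      by_cases hn : n < 16
      · rw [pvHexUpper, dif_pos hn, PySem.Chars.zfill.eq_def]
        rw [if_neg (by simp; omega)]
        have hnsign : ¬ (pvHexDigitU n = '+' ∨ pvHexDigitU n = '-') := by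
          interval_cases n <;> decide
        simp only [hnsign, if_false, List.length_cons, List.length_nil]
        rw [List.range_succ, List.map_append]
        have hzero : (List.range w).map (fun j => pvHexDigitU (n / 16 ^ (w + 1 - 1 - j) % 16))
            = List.replicate w '0' := by
          rw [show List.replicate w '0' = (List.range w).map (fun _ => '0') by
            simp [List.map_const']]
          apply List.map_congr_left
          intro j hj
          have hjw : j < w := List.mem_range.mp hj
          have hdiv : n / 16 ^ (w + 1 - 1 - j) = 0 := by
            apply Nat.div_eq_of_lt
            calc n < 16 := hn
              _ = 16 ^ 1 := by norm_num
              _ ≤ 16 ^ (w + 1 - 1 - j) := Nat.pow_le_pow_right (by norm_num) (by omega)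
          rw [hdiv]
          decide
        rw [hzero]
        simp [Nat.mod_eq_of_lt hn]
      · rw [pvHexUpper, dif_neg hn]
        obtain ⟨c, rest, he, hcmem⟩ := pvHexUpper_head (n / 16)
        have hnc : ¬ (c = '+' ∨ c = '-') := by fin_cases hcmem <;> decide
        rw [show ((w + 1 : Nat) : Int) = (w : Int) + 1 by push_cast; ring]
        rw [pvZfill_snoc _ _ c rest he hnc w]
        have hdivlt : n / 16 < 16 ^ w := by
          apply Nat.div_lt_of_lt_mul
          rw [pow_succ] at h2
          omega
        rw [ih (n / 16) hw1 hdivlt]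
        rw [List.range_succ, List.map_append]
        congr 1
        · apply List.map_congr_left
          intro j hj
          have hjw : j < w := List.mem_range.mp hj
          rw [Nat.div_div_eq_div_mul, ← pow_succ',
            show (w - 1 - j) + 1 = w + 1 - 1 - j by omega]
        · simp

-- == the nibble value from four membership tests ==

theorem pvNibbleSum (q : Nat) :
    (((List.range 4).filter (fun k => q.testBit (3 - k))).map (fun k => 8 >>> k)).sum
      = q % 16 := by
  have h4 : ∀ k ∈ List.range 4, q.testBit (3 - k) = (q % 16).testBit (3 - k) := by
    intro k hk
    have hk4 : k < 4 := List.mem_range.mp hk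
    rw [show (16 : Nat) = 2 ^ 4 by norm_num, Nat.testBit_mod_two_pow]
    simp [show 3 - k < 4 by omega]
  rw [List.filter_congr h4]
  have hlt : q % 16 < 16 := Nat.mod_lt _ (by norm_num)
  generalize q % 16 = r at *
  interval_cases r <;> decide

theorem pvDigits_getD (d : Nat) (hd : d < 16) : pvDigits.getD d '0' = pvHexDigitU d := by
  interval_cases d <;> decide

theorem pvNibble_eq (S : PySem.Set Int) (m w j : Nat) (_hj : j < w)
    (hmem : ∀ k, k < 4 →
      PySem.Set.contains S ((4 * j + k : Nat) : Int) = m.testBit (4 * (w - 1 - j) + (3 - k))) :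
    pvNibble S j = pvHexDigitU (m / 16 ^ (w - 1 - j) % 16) := by
  unfold pvNibble
  have hfil : ∀ k ∈ List.range 4,
      PySem.Set.contains S ((4 * j + k : Nat) : Int)
        = (m >>> (4 * (w - 1 - j))).testBit (3 - k) := by
    intro k hk
    rw [hmem k (List.mem_range.mp hk), Nat.testBit_shiftRight]
  rw [List.filter_congr hfil, pvNibbleSum]
  have hq : m >>> (4 * (w - 1 - j)) % 16 = m / 16 ^ (w - 1 - j) % 16 := by
    rw [Nat.shiftRight_eq_div_pow, show (16 : Nat) ^ (w - 1 - j) = 2 ^ (4 * (w - 1 - j)) by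
      rw [show (16 : Nat) = 2 ^ 4 by norm_num, ← pow_mul]]
  rw [hq]
  exact pvDigits_getD _ (Nat.mod_lt _ (by norm_num))

-- == remaining A-side characterisations ==

theorem pvBinVal_parse (w : Nat) (bm : Nat) (h : bm < 2 ^ w) :
    pvBinVal ((List.range w).map (fun i => if bm.testBit (w - 1 - i) then '1' else '0')) = bm := by
  unfold pvBinVal
  induction w generalizing bm with
  | zero => interval_cases bm; simp
  | succ w ih =>
    rw [List.range_succ, List.map_append]
    have hmap : (List.range w).map (fun i => if bm.testBit (w + 1 - 1 - i) then '1' else '0')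
        = (List.range w).map (fun i => if (bm / 2).testBit (w - 1 - i) then '1' else '0') := by
      apply List.map_congr_left
      intro i hi
      have hi' : i < w := List.mem_range.mp hi
      have he : w + 1 - 1 - i = (w - 1 - i) + 1 := by omega
      rw [he, Nat.testBit_succ]
    rw [hmap, List.foldl_append]
    have hdiv : bm / 2 < 2 ^ w := by
      apply Nat.div_lt_of_lt_mul
      rw [pow_succ] at h
      omega
    rw [ih (bm / 2) hdiv]
    simp only [List.map_cons, List.map_nil, List.foldl_cons, List.foldl_nil,
      show w + 1 - 1 - w = 0 by omega, Nat.testBit_zero]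
    rcases Nat.mod_two_eq_zero_or_one bm with h0 | h1
    · rw [h0]; norm_num
      rw [if_neg (by decide)]; omega
    · rw [h1]; norm_num; omega

theorem pvBinVal_full (bm : Nat) (h : bm < 2 ^ 128) : pvBinVal (pvBitsOf bm) = bm :=
  pvBinVal_parse 128 bm h

theorem pvBinVal_take (bm : Nat) (h : bm < 2 ^ 128) :
    pvBinVal ((pvBitsOf bm).take 64) = bm >>> 64 := by
  have h1 : (pvBitsOf bm).take 64
      = (List.range 64).map (fun i => if (bm >>> 64).testBit (64 - 1 - i) then '1' else '0') := by
    unfold pvBitsOf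
    rw [← List.map_take, List.take_range]
    apply List.map_congr_left
    intro i hi
    have hi' : i < 64 := by simpa using (List.mem_range.mp hi)
    rw [Nat.testBit_shiftRight]
    rw [show 127 - i = 64 + (64 - 1 - i) by omega]
  rw [h1]
  apply pvBinVal_parse
  rw [Nat.shiftRight_eq_div_pow]
  apply Nat.div_lt_of_lt_mul
  calc bm < 2 ^ 128 := h
    _ = 2 ^ 64 * 2 ^ 64 := by norm_num

theorem pvSecondary_contains (bm : Nat) :
    ((pvBitsOf bm).drop 64).contains '1' = true ↔ bm &&& ((1 <<< 64) - 1) ≠ 0 := by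
  rw [Nat.one_shiftLeft, Nat.and_two_pow_sub_one_eq_mod, List.contains_iff_mem]
  have hlen : ((pvBitsOf bm).drop 64).length = 64 := by simp [pvBitsOf]
  have hget : ∀ (p : Nat) (hp : p < 64), ((pvBitsOf bm).drop 64)[p]'(by omega) =
      (if bm.testBit (63 - p) then '1' else '0') := by
    intro p hp
    rw [List.getElem_drop]
    simp only [pvBitsOf, List.getElem_map, List.getElem_range]
    rw [show 127 - (64 + p) = 63 - p by omega]
  constructor
  · intro hmem hz
    rcases List.mem_iff_getElem.mp hmem with ⟨p, hp, he⟩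
    rw [hlen] at hp
    rw [hget p hp] at he
    have hbit : bm.testBit (63 - p) = true := by
      by_contra hb
      simp [hb] at he
    have : (bm % 2 ^ 64).testBit (63 - p) = true := by
      rw [Nat.testBit_mod_two_pow, hbit]
      simp
      omega
    rw [hz] at this
    simp [Nat.zero_testBit] at this
  · intro hz
    by_contra hmem
    apply hz
    apply Nat.eq_of_testBit_eq
    intro i
    rw [Nat.testBit_mod_two_pow, Nat.zero_testBit]
    by_cases hi : i < 64
    · have : bm.testBit i = false := by
        by_contra hb
        apply hmem
        apply List.mem_iff_getElem.mpr
        refine ⟨63 - i, by omega, ?_⟩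
        rw [hget (63 - i) (by omega), show 63 - (63 - i) = i by omega]
        simp at hb
        simp [hb]
      simp [this]
    · simp [hi]

theorem pvSet_take_drop (l : List Char) (h : 64 ≤ l.length) :
    ((l.take 64).set 0 '1') ++ l.drop 64 = l.set 0 '1' := by
  rw [← List.set_append_left _ _ (by simp [List.length_take]; omega), List.take_append_drop]

-- ===== VERDICT (by name: the statement is the Claim_ definition above) =====
theorem build_bitmap_spec : Claim_equal_build_bitmap := by
  intro fields _ _
  unfold Spec_build_bitmap build_bitmap build_bitmap_alt
  have hbits : fields.foldl pvSetBit (List.replicate 128 '0') = pvBitsOf (fields.foldl pvOrBit 0) := by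
    rw [← pvBitsOf_zero, pvLoop_eq]
  have hinv : pvInv (fields.foldl pvAddIdx PySem.Set.empty) (fields.foldl pvOrBit 0) :=
    pvLoop_inv fields _ _ pvInv_zero
  have hlt : fields.foldl pvOrBit 0 < 2 ^ 128 := pvLoop_lt _ _ (by norm_num)
  set bm := fields.foldl pvOrBit 0 with hbm
  set S := fields.foldl pvAddIdx PySem.Set.empty with hS
  simp only [hbits, PySem.List.slice_to _ (by norm_num : (0:Int) ≤ 64),
    PySem.List.slice_from _ (by norm_num : (0:Int) ≤ 64),
    show Int.toNat 64 = 64 from rfl]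
  by_cases hc : bm &&& ((1 <<< 64) - 1) ≠ 0
  · rw [if_pos ((pvSecondary_contains bm).mpr hc), if_pos ((pvAny_iff S bm hinv).mpr hc)]
    rw [pvSet_take_drop _ (by simp [pvBitsOf]), pvBitsOf_set bm 0 (by omega),
      show (127:Nat) - 0 = 127 from rfl]
    have hor : bm ||| (1 <<< 127) < 2 ^ 128 := by
      refine Nat.or_lt_two_pow hlt ?_
      rw [Nat.one_shiftLeft]
      exact pow_lt_pow_right₀ (by omega) (by omega)
    have hinv' : pvInv (PySem.Set.add S 0) (bm ||| (1 <<< 127)) := by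
      have := pvInv_add S bm hinv 0 (by norm_num) (by norm_num)
      simpa using this
    rw [pvBinVal_full _ hor, pvUpper_zfill]
    congr 1
    rw [show (32 : Int) = ((32 : Nat) : Int) by norm_num,
      pvFormat 32 _ (by norm_num) (by norm_num at hor ⊢; omega)]
    apply List.map_congr_left
    intro j hj
    have hjw : j < 32 := List.mem_range.mp hj
    rw [pvNibble_eq (PySem.Set.add S 0) (bm ||| (1 <<< 127)) 32 j hjw]
    intro k hk
    rw [Bool.eq_iff_iff, PySem.Set.contains_iff, hinv' _]
    have htn : ((4 * j + k : Nat) : Int).toNat = 4 * j + k := by omega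
    rw [htn, show 127 - (4 * j + k) = 4 * (32 - 1 - j) + (3 - k) by omega]
    constructor
    · rintro ⟨_, _, hb⟩; exact hb
    · intro hb; exact ⟨by positivity, by push_cast; omega, hb⟩
  · rw [if_neg (fun hm => hc ((pvSecondary_contains bm).mp hm)),
      if_neg (fun hm => hc ((pvAny_iff S bm hinv).mp hm))]
    rw [pvBinVal_take _ hlt, pvUpper_zfill]
    congr 1
    have hsh : bm >>> 64 < 16 ^ 16 := by
      rw [Nat.shiftRight_eq_div_pow]
      apply Nat.div_lt_of_lt_mul
      calc bm < 2 ^ 128 := hlt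
        _ = 2 ^ 64 * 2 ^ 64 := by norm_num
        _ ≤ 16 ^ 16 * 2 ^ 64 := by norm_num
    rw [show (16 : Int) = ((16 : Nat) : Int) by norm_num,
      pvFormat 16 _ (by norm_num) hsh]
    apply List.map_congr_left
    intro j hj
    have hjw : j < 16 := List.mem_range.mp hj
    rw [pvNibble_eq S (bm >>> 64) 16 j hjw]
    intro k hk
    rw [Bool.eq_iff_iff, PySem.Set.contains_iff, hinv _]
    rw [Nat.testBit_shiftRight]
    have htn : ((4 * j + k : Nat) : Int).toNat = 4 * j + k := by omega
    rw [htn, show 127 - (4 * j + k) = 64 + (4 * (16 - 1 - j) + (3 - k)) by omega]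
    constructor
    · rintro ⟨_, _, hb⟩; exact hb
    · intro hb; exact ⟨by positivity, by push_cast; omega, hb⟩
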